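-- pv_equiv track=rewrite | github.com/MK-Lee13/Algorithm-Study | Programmers/level_2/17_english_endwords.py | solution
-- ===== SOURCE A (Python) =====
-- def solution(n, words):
--     answer = [0, 0]
--     position = 0
--     character = 1
--     beforeWord = ''
--     cache = {}
--     for word in words:
--         if word in cache:
--             return makeAnswer(character, position, n)
--
--         if beforeWord != word[0] and beforeWord != '':
--             return makeAnswer(character, position, n)
--         cache[word] = 1
--         beforeWord = word[-1]
--         character += 1
--         position += 1
--     return answer
--
-- def makeAnswer(character, position, n):
--     character = character % n
--     position = position // n
--     if character == 0:
--         return [n, position + 1]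
--     else:
--         return [character, position + 1]
-- ===== SOURCE B (Python) =====
-- def solution(n, words):
--     # Two independent scans: earliest duplicate index and earliest chain-break
--     # index (via raise-free slices); the answer depends only on their minimum.
--     firstDup = None
--     seen = set()
--     for i, w in enumerate(words):
--         if w in seen:
--             firstDup = i
--             break
--         seen.add(w)
--     firstBreak = None
--     i = 1
--     for prev, cur in zip(words, words[1:]):
--         if cur[:1] != prev[-1:]:
--             firstBreak = i
--             break
--         i += 1
--     if firstDup is None and firstBreak is None:
--         return [0, 0]
--     f = min(x for x in (firstDup, firstBreak) if x is not None)
--     c = (f + 1) % n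
--     return [n if c == 0 else c, f // n + 1]
-- ===== Notes on version B (the rewrite author's own statement) =====
-- stated objective: alternative
-- what changed: A's single interleaved loop carrying position/character/beforeWord/cache is replaced by two independent scans (earliest duplicate index via a seen-set, earliest chain-break index via slice comparison over adjacent pairs) whose minimum determines the answer.
import Mathlib
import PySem

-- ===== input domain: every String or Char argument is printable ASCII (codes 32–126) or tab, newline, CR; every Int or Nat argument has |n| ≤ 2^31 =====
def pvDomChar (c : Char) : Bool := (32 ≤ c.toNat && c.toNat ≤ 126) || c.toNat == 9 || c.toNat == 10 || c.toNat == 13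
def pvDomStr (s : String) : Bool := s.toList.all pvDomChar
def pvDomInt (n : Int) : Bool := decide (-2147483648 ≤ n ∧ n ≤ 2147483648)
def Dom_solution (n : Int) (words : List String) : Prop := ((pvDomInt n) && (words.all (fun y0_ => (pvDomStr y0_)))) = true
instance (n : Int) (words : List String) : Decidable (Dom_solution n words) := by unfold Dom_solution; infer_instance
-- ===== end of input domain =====

-- B splits A's single stateful loop into two independent scans (earliest duplicate
-- index, earliest slice-compared chain-break index) combined by min; objective: alternative decomposition.


-- ===== PORT A =====
-- In A, beforeWord is always '' or a one-character string (word[-1]); it is modeled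
-- exactly as Option Char (none = '', some c = the one-character string of c).
def makeAnswer (character position n : Int) : List Int :=
  let character := PySem.Int.mod character n
  let position := PySem.Int.floordiv position n
  if character = 0 then [n, position + 1] else [character, position + 1]

def solutionLoop (n : Int) (position character : Int)
    (beforeWord : Option Char) (cache : PySem.Dict String Int) :
    List String → List Int
  | [] => [0, 0]
  | word :: rest =>
    if (cache.get? word).isSome then makeAnswer character position n
    else if beforeWord ≠ PySem.Str.pyGet? word 0 ∧ beforeWord ≠ none then
      makeAnswer character position n
    else
      solutionLoop n (position + 1) (character + 1)
        (PySem.Str.pyGet? word (-1)) (cache.insert word 1) rest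

def solution (n : Int) (words : List String) : List Int :=
  solutionLoop n 0 1 none PySem.Dict.empty words

-- ===== PORT B =====
def firstDupAux (seen : PySem.Set String) (i : Int) : List String → Option Int
  | [] => none
  | w :: rest =>
    if PySem.Set.contains seen w then some i
    else firstDupAux (PySem.Set.add seen w) (i + 1) rest

-- first index i ≥ 1 with cur[:1] != prev[-1:], scanning adjacent pairs (zip)
def firstBreakAux (i : Int) : List String → Option Int
  | [] => none
  | [_] => none
  | prev :: cur :: rest =>
    if PySem.List.slice cur.toList (some 0) (some 1)
        ≠ PySem.List.slice prev.toList (some (-1)) none then some i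
    else firstBreakAux (i + 1) (cur :: rest)

def renderB (n f : Int) : List Int :=
  let c := PySem.Int.mod (f + 1) n
  [if c = 0 then n else c, PySem.Int.floordiv f n + 1]

def solution_alt (n : Int) (words : List String) : List Int :=
  let firstDup := firstDupAux PySem.Set.empty 0 words
  let firstBreak := firstBreakAux 1 words
  match firstDup, firstBreak with
  | none, none => [0, 0]
  | none, some f => renderB n f
  | some f, none => renderB n f
  | some a, some b => renderB n (min a b)

-- ===== PRECONDITION & SPEC =====
-- failAt words k: the word-chain game fails at index k (duplicate of an earlier
-- word, or its first character differs from the last character of a nonempty predecessor).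
def failAt (ws : List String) (k : Nat) : Bool :=
  match ws[k]? with
  | none => false
  | some w =>
    (ws.take k).contains w ||
    (decide (1 ≤ k) && ((ws.getD (k-1) "").toList.getLast?.isSome &&
      decide (w.toList.head? ≠ (ws.getD (k-1) "").toList.getLast?)))

-- Pre_ excludes exactly the inputs on which A raises: an empty word reached before any
-- game failure makes A evaluate ''[0] (IndexError), and a reached failure with n = 0
-- makes makeAnswer divide by zero (ZeroDivisionError); on every other input A returns.
def Pre_solution (n : Int) (words : List String) : Prop :=
  ("" ∈ words → ∃ i < words.idxOf "", failAt words i = true) ∧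
  ((∃ i < words.idxOf "", failAt words i = true) → n ≠ 0)
instance (n : Int) (words : List String) : Decidable (Pre_solution n words) := by unfold Pre_solution; infer_instance
def pvWitness_solution : Int × List String := (3, ["ab", "ba", "ab"])
def Spec_solution (n : Int) (words : List String) (out : List Int) : Prop := out = solution_alt n words
instance (n : Int) (words : List String) (out : List Int) : Decidable (Spec_solution n words out) := by unfold Spec_solution; infer_instance

-- ===== CLAIM (what is proved, stated in full; the proofs are below) =====
def Claim_equal_solution : Prop := ∀ (n : Int) (words : List String), Dom_solution n words → Pre_solution n words → Spec_solution n words (solution n words)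

-- ===== LEMMAS AND PROOFS =====

-- render agreement: A's makeAnswer at fail index f equals B's renderB
theorem makeAnswer_eq_renderB (n f : Int) : makeAnswer (f + 1) f n = renderB n f := by
  unfold makeAnswer renderB
  by_cases h : PySem.Int.mod (f + 1) n = 0 <;> simp [h]

-- the option-min combination B performs
def minFail : Option Int → Option Int → Option Int
  | none, none => none
  | none, some f => some f
  | some f, none => some f
  | some a, some b => some (min a b)

def renderOpt (n : Int) : Option Int → List Int
  | none => [0, 0]
  | some f => renderB n f

-- canonical first-failure scan both ports are reduced to
def ff (seen : PySem.Set String) (prev : Option Char) (i : Int) : List String → Option Int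
  | [] => none
  | w :: rest =>
    if PySem.Set.contains seen w ∨ (prev ≠ none ∧ w.toList.head? ≠ prev) then some i
    else ff (PySem.Set.add seen w) w.toList.getLast? (i + 1) rest

theorem solution_alt_eq_renderOpt (n : Int) (words : List String) :
    solution_alt n words =
      renderOpt n (minFail (firstDupAux PySem.Set.empty 0 words) (firstBreakAux 1 words)) := by
  unfold solution_alt
  cases firstDupAux PySem.Set.empty 0 words <;> cases firstBreakAux 1 words <;>
    simp [minFail, renderOpt]

theorem firstDupAux_ge (ws : List String) (seen : PySem.Set String) (i k : Int)
    (h : firstDupAux seen i ws = some k) : i ≤ k := by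
  induction ws generalizing seen i with
  | nil => simp [firstDupAux] at h
  | cons w rest ih =>
    unfold firstDupAux at h
    split at h
    · simp only [Option.some.injEq] at h; omega
    · have := ih _ _ h; omega

theorem firstBreakAux_ge (ws : List String) (i k : Int)
    (h : firstBreakAux i ws = some k) : i ≤ k := by
  induction ws generalizing i with
  | nil => simp [firstBreakAux] at h
  | cons w rest ih =>
    cases rest with
    | nil => simp [firstBreakAux] at h
    | cons cur rest' =>
      unfold firstBreakAux at h
      split at h
      · simp_all
      · have := ih _ h; omega

-- slice bridges: xs[:1] is head?.toList, xs[-1:] is getLast?.toList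
theorem slice_take_one (xs : List Char) :
    PySem.List.slice xs (some 0) (some 1) = xs.head?.toList := by
  have h0 : ((0 : Int)) = ((0 : Nat) : Int) := rfl
  have h1 : ((1 : Int)) = ((1 : Nat) : Int) := rfl
  rw [h0, h1, PySem.List.slice_natCast]
  cases xs <;> simp

theorem drop_len_sub_one (xs : List Char) :
    xs.drop (xs.length - 1) = xs.getLast?.toList := by
  induction xs with
  | nil => simp
  | cons a t ih =>
    cases t with
    | nil => simp
    | cons b t' =>
      have : (a :: b :: t').drop ((a :: b :: t').length - 1) = (b :: t').drop ((b :: t').length - 1) := by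
        simp
      rw [this, ih]
      simp

theorem slice_last (xs : List Char) :
    PySem.List.slice xs (some (-1)) none = xs.getLast?.toList := by
  rw [PySem.List.slice_from_neg_one, drop_len_sub_one]

theorem mem_invariant_step (seen : PySem.Set String) (cache : PySem.Dict String Int)
    (w : String) (hmem : ∀ x, (cache.get? x).isSome = PySem.Set.contains seen x) :
    ∀ x, ((cache.insert w 1).get? x).isSome
      = PySem.Set.contains (PySem.Set.add seen w) x := by
  intro x
  by_cases hx : x = w
  · subst hx
    simp [PySem.Dict.get?_insert_self, PySem.Set.mem_add]
  · rw [PySem.Dict.get?_insert_of_ne _ _ hx, hmem x]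
    simp [PySem.Set.mem_add, hx]

theorem getLast?_some_of_ne (s : String) (h : s ≠ "") : ∃ c, s.toList.getLast? = some c := by
  have h2 : s.toList ≠ [] := by
    intro he; apply h; cases s; simp_all
  exact Option.isSome_iff_exists.mp (List.getLast?_isSome.mpr h2)

-- A-side bridge: A's loop in the state after i successful steps is the canonical scan
theorem loopA (n : Int) (ws : List String) (seen : PySem.Set String)
    (cache : PySem.Dict String Int) (prev : Option Char) (i : Int)
    (hmem : ∀ x, (cache.get? x).isSome = PySem.Set.contains seen x) :
    solutionLoop n i (i + 1) prev cache ws = renderOpt n (ff seen prev i ws) := by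
  induction ws generalizing seen cache prev i with
  | nil => simp [solutionLoop, ff, renderOpt]
  | cons w rest ih =>
    have hget0 : PySem.Str.pyGet? w 0 = w.toList.head? := by
      simp [PySem.Str.pyGet?, PySem.List.pyGet?_zero, List.head?_eq_getElem?]
    have hgetm1 : PySem.Str.pyGet? w (-1) = w.toList.getLast? := by
      simp [PySem.Str.pyGet?, PySem.List.pyGet?_neg_one]
    by_cases hdup : w ∈ seen
    · have hsome : (cache.get? w).isSome = true := by
        rw [hmem]; exact (PySem.Set.contains_iff _ _).mpr hdup
      have hA : solutionLoop n i (i + 1) prev cache (w :: rest) = makeAnswer (i + 1) i n := by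
        simp only [solutionLoop]; rw [if_pos hsome]
      have hF : ff seen prev i (w :: rest) = some i := by
        simp only [ff]; rw [if_pos (Or.inl ((PySem.Set.contains_iff _ _).mpr hdup))]
      rw [hA, hF, makeAnswer_eq_renderB]; rfl
    · have hsome : ¬ ((cache.get? w).isSome = true) := by
        rw [hmem]; exact fun h => hdup ((PySem.Set.contains_iff _ _).mp h)
      have hnodup : ¬ (PySem.Set.contains seen w = true) :=
        fun h => hdup ((PySem.Set.contains_iff _ _).mp h)
      by_cases hbr : prev ≠ none ∧ w.toList.head? ≠ prev
      · have hcond : prev ≠ PySem.Str.pyGet? w 0 ∧ prev ≠ none := by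
          rw [hget0]; exact ⟨fun h => hbr.2 h.symm, hbr.1⟩
        have hA : solutionLoop n i (i + 1) prev cache (w :: rest) = makeAnswer (i + 1) i n := by
          simp only [solutionLoop]; rw [if_neg hsome, if_pos hcond]
        have hF : ff seen prev i (w :: rest) = some i := by
          simp only [ff]; rw [if_pos (Or.inr hbr)]
        rw [hA, hF, makeAnswer_eq_renderB]; rfl
      · have hcond : ¬ (prev ≠ PySem.Str.pyGet? w 0 ∧ prev ≠ none) := by
          rw [hget0]; intro h; exact hbr ⟨h.2, fun h2 => h.1 h2.symm⟩
        have hA : solutionLoop n i (i + 1) prev cache (w :: rest)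
            = solutionLoop n (i + 1) (i + 1 + 1) w.toList.getLast? (cache.insert w 1) rest := by
          simp only [solutionLoop]; rw [if_neg hsome, if_neg hcond, hgetm1]
        have hF : ff seen prev i (w :: rest)
            = ff (PySem.Set.add seen w) w.toList.getLast? (i + 1) rest := by
          simp only [ff]; rw [if_neg (fun h => h.elim hnodup hbr)]
        rw [hA, hF]
        exact ih _ _ _ _ (mem_invariant_step seen cache w hmem)

-- B-side bridge: the min of the two independent scans is the canonical scan,
-- as long as the word preceding the suffix is nonempty
theorem bridgeB (ws : List String) (prevStr : String) (seen : PySem.Set String) (i : Int)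
    (hprev : prevStr ≠ "") :
    minFail (firstDupAux seen i ws) (firstBreakAux i (prevStr :: ws))
      = ff seen prevStr.toList.getLast? i ws := by
  induction ws generalizing prevStr seen i with
  | nil => simp [firstDupAux, firstBreakAux, ff, minFail]
  | cons w rest ih =>
    obtain ⟨c, hc⟩ := getLast?_some_of_ne prevStr hprev
    by_cases hdup : w ∈ seen
    · have hdupT : PySem.Set.contains seen w = true := (PySem.Set.contains_iff _ _).mpr hdup
      have hff : ff seen prevStr.toList.getLast? i (w :: rest) = some i := by
        simp only [ff]; rw [if_pos (Or.inl hdupT)]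
      have hfd : firstDupAux seen i (w :: rest) = some i := by
        simp only [firstDupAux]; rw [if_pos hdupT]
      rw [hff, hfd]
      cases hfb : firstBreakAux i (prevStr :: w :: rest) with
      | none => simp [minFail]
      | some k =>
        have hk := firstBreakAux_ge _ _ _ hfb
        simp [minFail, min_eq_left hk]
    · have hdupF : ¬ (PySem.Set.contains seen w = true) :=
        fun h => hdup ((PySem.Set.contains_iff _ _).mp h)
      have hfdstep : firstDupAux seen i (w :: rest)
          = firstDupAux (PySem.Set.add seen w) (i + 1) rest := by
        simp only [firstDupAux]; rw [if_neg hdupF]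
      by_cases hbr : w.toList.head? = some c
      · -- no failure at this index: everything steps
        have hw : w ≠ "" := by
          intro he; rw [he] at hbr; simp at hbr
        have hff : ff seen prevStr.toList.getLast? i (w :: rest)
            = ff (PySem.Set.add seen w) w.toList.getLast? (i + 1) rest := by
          simp only [ff]
          rw [if_neg (fun h => h.elim hdupF (fun hb => hb.2 (by rw [hbr, hc])))]
        have hsl : ¬ (PySem.List.slice w.toList (some 0) (some 1)
            ≠ PySem.List.slice prevStr.toList (some (-1)) none) := by
          rw [slice_take_one, slice_last, hbr, hc]; exact fun h => h rfl
        have hfb : firstBreakAux i (prevStr :: w :: rest)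
            = firstBreakAux (i + 1) (w :: rest) := by
          simp only [firstBreakAux]; rw [if_neg hsl]
        rw [hff, hfdstep, hfb]
        exact ih w _ _ hw
      · -- chain break at this index
        have hff : ff seen prevStr.toList.getLast? i (w :: rest) = some i := by
          simp only [ff]
          rw [if_pos (Or.inr ⟨(by rw [hc]; simp), (by rw [hc]; exact hbr)⟩)]
        have hsl : PySem.List.slice w.toList (some 0) (some 1)
            ≠ PySem.List.slice prevStr.toList (some (-1)) none := by
          rw [slice_take_one, slice_last, hc]
          intro h
          cases hh : w.toList.head? with
          | none => rw [hh] at h; simp at h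
          | some d => rw [hh] at h; simp at h; exact hbr (by rw [hh, h])
        have hfb : firstBreakAux i (prevStr :: w :: rest) = some i := by
          simp only [firstBreakAux]; rw [if_pos hsl]
        rw [hff, hfb, hfdstep]
        cases hfd : firstDupAux (PySem.Set.add seen w) (i + 1) rest with
        | none => simp [minFail]
        | some k =>
          have hk := firstDupAux_ge _ _ _ _ hfd
          simp [minFail, min_eq_right (by omega : i ≤ k)]

theorem solution_spec : Claim_equal_solution := by
  intro n words hdom hpre
  unfold Spec_solution
  obtain ⟨h1, -⟩ := hpre
  cases words with
  | nil => simp [solution, solutionLoop, solution_alt, firstDupAux, firstBreakAux]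
  | cons w rest =>
    have hw : w ≠ "" := by
      intro he
      subst he
      obtain ⟨i, hi, -⟩ := h1 (by simp)
      rw [List.idxOf_cons_self] at hi
      omega
    have hmem0 : ∀ x, ((PySem.Dict.empty : PySem.Dict String Int).get? x).isSome
        = PySem.Set.contains (PySem.Set.empty : PySem.Set String) x := by
      intro x; simp [PySem.Dict.get?_empty, PySem.Set.empty]
    have hA : solution n (w :: rest) = renderOpt n (ff PySem.Set.empty none 0 (w :: rest)) := by
      unfold solution
      exact loopA n (w :: rest) _ _ none 0 hmem0
    have hffstep : ff PySem.Set.empty none 0 (w :: rest)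
        = ff (PySem.Set.add PySem.Set.empty w) w.toList.getLast? 1 rest := by
      simp only [ff]
      rw [if_neg (fun h => h.elim (fun hc => by simp [PySem.Set.empty] at hc) (fun hb => hb.1 rfl))]
      norm_num
    have hfdstep : firstDupAux PySem.Set.empty 0 (w :: rest)
        = firstDupAux (PySem.Set.add PySem.Set.empty w) 1 rest := by
      simp only [firstDupAux]
      rw [if_neg (fun hc => by simp [PySem.Set.empty] at hc)]
      norm_num
    rw [hA, solution_alt_eq_renderOpt, hfdstep, hffstep, bridgeB rest w _ 1 hw]
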